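-- pv_equiv track=rewrite | github.com/pypi-data/pypi-mirror-81 | packages/eqparse/eqparse-0.0.1.tar.gz/eqparse-0.0.1/eqparse/useful scripts/copy_floor.py | getflr
-- ===== SOURCE A (Python) =====
-- def getflr(listname, flrname):
--     '''opens input file, returns list of entire specified floor'''
--     write = False
--     flrlist = []
--     for f in listname:
--         if flrname in f and "= FLOOR " in f:
--             write = True
--         if flrname not in f and "= FLOOR " in f:
--             write = False
--         if write:
--             flrlist.append(f)
--     return flrlist
-- ===== SOURCE B (Python) =====
-- def getflr(listname, flrname):
--     '''opens input file, returns list of entire specified floor'''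
--     segments = []
--     for f in listname:
--         if "= FLOOR " in f:
--             segments.append([f])
--         elif segments:
--             segments[-1].append(f)
--     return [line for seg in segments if flrname in seg[0] for line in seg]
-- ===== Notes on version B (the rewrite author's own statement) =====
-- stated objective: simpler
-- what changed: Replaces A's running write-flag with a one-pass segmentation of the lines into '= FLOOR '-headed sections followed by a comprehension that flattens the sections whose header contains flrname.
import Mathlib
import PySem

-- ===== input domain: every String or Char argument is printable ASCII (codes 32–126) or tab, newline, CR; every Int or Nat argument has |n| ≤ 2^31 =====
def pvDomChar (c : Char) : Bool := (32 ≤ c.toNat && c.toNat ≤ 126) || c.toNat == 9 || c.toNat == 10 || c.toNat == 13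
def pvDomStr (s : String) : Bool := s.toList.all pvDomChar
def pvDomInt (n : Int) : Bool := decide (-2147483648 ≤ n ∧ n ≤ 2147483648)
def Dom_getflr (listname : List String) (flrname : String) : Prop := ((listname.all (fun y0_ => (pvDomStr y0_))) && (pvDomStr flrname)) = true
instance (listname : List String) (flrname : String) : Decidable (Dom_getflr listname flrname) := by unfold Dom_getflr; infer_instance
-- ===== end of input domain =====

-- B replaces A's running write-flag with a one-pass segmentation into floor sections plus a filtering
-- flatten; objective: simpler (a plainer decomposition, same cost). Equivalence proved for all inputs.

-- ===== PORT A =====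
-- one iteration of A's loop: the two independent `if`s updating `write`, then the conditional append
def stepA (flrname : String) (st : Bool × List String) (f : String) : Bool × List String :=
  let write := st.1
  let write := if PySem.Str.isIn flrname f && PySem.Str.isIn "= FLOOR " f then true else write
  let write := if !(PySem.Str.isIn flrname f) && PySem.Str.isIn "= FLOOR " f then false else write
  let flrlist := if write then st.2 ++ [f] else st.2
  (write, flrlist)

def getflr (listname : List String) (flrname : String) : List String :=
  (listname.foldl (stepA flrname) (false, [])).2

-- ===== PORT B =====
-- one iteration of B's loop: start a new segment on a boundary line, else append to the last segment
-- (every segment starts with its boundary line, so segments are never empty: the `getLastD []` and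
-- `headD ""` defaults are never reached and are exact there)
def stepB (segments : List (List String)) (f : String) : List (List String) :=
  if PySem.Str.isIn "= FLOOR " f then segments ++ [[f]]
  else if segments.isEmpty then segments
  else segments.dropLast ++ [segments.getLastD [] ++ [f]]

def getflr_alt (listname : List String) (flrname : String) : List String :=
  let segments := listname.foldl stepB []
  (segments.filter (fun seg => PySem.Str.isIn flrname (seg.headD ""))).flatten

-- ===== PRECONDITION & SPEC =====
def Spec_getflr (listname : List String) (flrname : String) (out : List String) : Prop := out = getflr_alt listname flrname
instance (listname : List String) (flrname : String) (out : List String) : Decidable (Spec_getflr listname flrname out) := by unfold Spec_getflr; infer_instance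

-- ===== CLAIM (what is proved, stated in full; the proofs are below) =====
def Claim_equal_getflr : Prop := ∀ (listname : List String) (flrname : String), Dom_getflr listname flrname → Spec_getflr listname flrname (getflr listname flrname)

-- ===== LEMMAS AND PROOFS =====

-- B's final comprehension, as a function of the segment list
def segOut (flrname : String) (segs : List (List String)) : List String :=
  (segs.filter (fun seg => PySem.Str.isIn flrname (seg.headD ""))).flatten

-- the write-flag A carries, read off B's segment list: does the last segment's header match?
def lastMatch (flrname : String) (segs : List (List String)) : Bool :=
  match segs.getLast? with
  | none => false
  | some s => PySem.Str.isIn flrname (s.headD "")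

theorem stepB_nonempty {segs : List (List String)} (h : ∀ s ∈ segs, s ≠ []) (f : String) :
    ∀ s ∈ stepB segs f, s ≠ [] := by
  intro s hs
  unfold stepB at hs
  split at hs
  · rcases List.mem_append.1 hs with h1 | h1
    · exact h s h1
    · simp at h1; simp [h1]
  · split at hs
    · exact h s hs
    · rcases List.mem_append.1 hs with h1 | h1
      · exact h s (List.dropLast_subset _ h1)
      · simp at h1; simp [h1]

theorem step_agree (flrname : String) {segs : List (List String)} (h : ∀ s ∈ segs, s ≠ [])
    (f : String) :
    (lastMatch flrname (stepB segs f), segOut flrname (stepB segs f))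
      = stepA flrname (lastMatch flrname segs, segOut flrname segs) f := by
  by_cases hb : PySem.Chars.isIn ['=', ' ', 'F', 'L', 'O', 'O', 'R', ' '] f.toList = true
  · by_cases hm : PySem.Chars.isIn flrname.toList f.toList = true
    · simp [stepA, stepB, lastMatch, segOut, hb, hm, List.filter_append, List.getLast?_append]
    · simp only [Bool.not_eq_true] at hm
      simp [stepA, stepB, lastMatch, segOut, hb, hm, List.filter_append, List.getLast?_append]
  · simp only [Bool.not_eq_true] at hb
    rcases List.eq_nil_or_concat segs with rfl | ⟨dl, L, rfl⟩
    · simp [stepA, stepB, lastMatch, segOut, hb]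
    · have hne : L ≠ [] := h L (by simp)
      obtain ⟨a, t, rfl⟩ : ∃ a t, L = a :: t := by
        cases L with
        | nil => exact absurd rfl hne
        | cons a t => exact ⟨a, t, rfl⟩
      by_cases hp : PySem.Chars.isIn flrname.toList a.toList = true
      · simp [stepA, stepB, lastMatch, segOut, hb, hp, List.filter_append, List.getLast?_append]
      · simp only [Bool.not_eq_true] at hp
        simp [stepA, stepB, lastMatch, segOut, hb, hp, List.filter_append, List.getLast?_append]

theorem foldl_agree (flrname : String) (l : List String) :
    ∀ (segs : List (List String)), (∀ s ∈ segs, s ≠ []) →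
      segOut flrname (l.foldl stepB segs)
        = (l.foldl (stepA flrname) (lastMatch flrname segs, segOut flrname segs)).2 := by
  induction l with
  | nil => intro segs _; rfl
  | cons f t ih =>
      intro segs h
      simp only [List.foldl_cons]
      rw [← step_agree flrname h f]
      exact ih (stepB segs f) (stepB_nonempty h f)

-- ===== VERDICT (by name: the statement is the Claim_ definition above) =====
theorem getflr_spec : Claim_equal_getflr := by
  intro listname flrname _
  unfold Spec_getflr getflr getflr_alt
  have := foldl_agree flrname listname [] (by simp)
  simpa [segOut, lastMatch] using this.symm
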